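-- pv_equiv track=rewrite | github.com/keanay/Game_2048 | game2048.py | up_rearranger
-- ===== SOURCE A (Python) =====
-- EMPTYCELL='<>'
--
-- CELLSANDROWSNUM=4
--
-- def up_rearranger(board):
-- 	addtwo=False
-- 	for row in range(CELLSANDROWSNUM-1):
-- 		for cell in range(CELLSANDROWSNUM):
-- 			if board[row][cell]==EMPTYCELL:
-- 				for nxtrow in range(1,(CELLSANDROWSNUM-row)):
-- 					if board[row+nxtrow][cell]!=EMPTYCELL:
-- 						board[row][cell]=board[row+nxtrow][cell]
-- 						board[row+nxtrow][cell]=EMPTYCELL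
-- 						addtwo=True
-- 						break
-- 	return addtwo
-- ===== SOURCE B (Python) =====
-- EMPTYCELL='<>'
--
-- CELLSANDROWSNUM=4
--
-- def up_rearranger(board):
-- 	olds = [[board[r][c] for r in range(CELLSANDROWSNUM)] for c in range(CELLSANDROWSNUM)]
-- 	moved = False
-- 	for c in range(CELLSANDROWSNUM):
-- 		old = olds[c]
-- 		vals = [v for v in old if v != EMPTYCELL]
-- 		new = vals + [EMPTYCELL] * (CELLSANDROWSNUM - len(vals))
-- 		if new != old:
-- 			moved = True
-- 			for r in range(CELLSANDROWSNUM):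
-- 				board[r][c] = new[r]
-- 	return moved
-- ===== Notes on version B (the rewrite author's own statement) =====
-- stated objective: simpler
-- what changed: A scans each empty cell and searches downward for a value to swap up, cell by cell; B gathers each column's non-empty values once, pads with EMPTYCELL, writes the compacted column back and flags movement by comparing it with the original column.
import Mathlib
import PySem

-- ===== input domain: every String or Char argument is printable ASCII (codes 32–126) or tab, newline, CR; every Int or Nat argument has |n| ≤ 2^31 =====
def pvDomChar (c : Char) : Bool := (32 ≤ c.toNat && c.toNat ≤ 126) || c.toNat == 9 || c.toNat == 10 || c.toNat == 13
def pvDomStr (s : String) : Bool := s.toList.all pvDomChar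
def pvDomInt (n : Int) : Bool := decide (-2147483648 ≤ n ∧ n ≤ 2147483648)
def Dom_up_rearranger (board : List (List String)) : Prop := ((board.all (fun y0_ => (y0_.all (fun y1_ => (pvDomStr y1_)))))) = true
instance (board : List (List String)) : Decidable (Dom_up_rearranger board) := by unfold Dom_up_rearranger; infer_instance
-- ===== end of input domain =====

-- B replaces A's per-empty-cell downward search-and-swap with a per-column collect-then-rewrite
-- pass (objective: simpler). Both Pythons mutate `board` in place identically on Pre_; the
-- equivalence proved here is about the RETURN value only (the mutation is not modeled).

-- ===== PORT A =====
-- board[r][c] read / write (indices are in range under Pre_, so getD/set are exact here)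
def pvGetc (b : List (List String)) (r c : Nat) : String := (b.getD r []).getD c ""
def pvSetc (b : List (List String)) (r c : Nat) (v : String) : List (List String) :=
  b.modify r (fun rw => rw.set c v)

-- inner `for nxtrow in range(1, 4-row): … break`
def pvPull (row cell : Nat) (ns : List Nat) (b : List (List String)) :
    List (List String) × Bool :=
  match ns with
  | [] => (b, false)
  | n :: rest =>
      if pvGetc b (row + n) cell ≠ "<>" then
        (pvSetc (pvSetc b row cell (pvGetc b (row + n) cell)) (row + n) cell "<>", true)
      else pvPull row cell rest b

-- body of the two nested loops at one (row, cell)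
def pvStepA (row cell : Nat) (s : List (List String) × Bool) : List (List String) × Bool :=
  if pvGetc s.1 row cell = "<>" then
    let p := pvPull row cell (List.range' 1 (3 - row)) s.1
    (p.1, s.2 || p.2)
  else s

def up_rearranger (board : List (List String)) : Bool :=
  ((List.range 3).foldl
    (fun s row => (List.range 4).foldl (fun s cell => pvStepA row cell s) s)
    (board, false)).2

-- ===== PORT B =====
-- olds[c] = [board[r][c] for r in range(4)]
def pvColOf (b : List (List String)) (c : Nat) : List String :=
  (List.range 4).map (fun r => pvGetc b r c)

def up_rearranger_alt (board : List (List String)) : Bool :=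
  let olds := (List.range 4).map (fun c => pvColOf board c)
  olds.foldl
    (fun moved old =>
      let vals := old.filter (fun v => v ≠ "<>")
      let newc := vals ++ List.replicate (4 - vals.length) "<>"
      if newc ≠ old then true else moved)
    false

-- ===== PRECONDITION & SPEC =====
-- Pre_ restricts to the game's natural domain: at least 4 rows, the first 4 rows each with at
-- least 4 cells (A indexes board[0..3][0..3]).  A raises IndexError outside this in general,
-- but happens to return False on some degenerate short boards whose empty-cell pattern never
-- forces an out-of-range access; those accidental returns are excluded as outside the domain.
def Pre_up_rearranger (board : List (List String)) : Prop :=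
  4 ≤ board.length ∧ ∀ i, i < 4 → 4 ≤ (board.getD i []).length
instance (board : List (List String)) : Decidable (Pre_up_rearranger board) := by
  unfold Pre_up_rearranger; infer_instance

def pvWitness_up_rearranger : List (List String) :=
  [["2", "<>", "2", "<>"], ["<>", "2", "4", "<>"], ["2", "<>", "<>", "<>"], ["<>", "4", "2", "2"]]

def Spec_up_rearranger (board : List (List String)) (out : Bool) : Prop := out = up_rearranger_alt board
instance (board : List (List String)) (out : Bool) : Decidable (Spec_up_rearranger board out) := by unfold Spec_up_rearranger; infer_instance

-- ===== CLAIM (what is proved, stated in full; the proofs are below) =====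
def Claim_equal_up_rearranger : Prop := ∀ (board : List (List String)), Dom_up_rearranger board → Pre_up_rearranger board → Spec_up_rearranger board (up_rearranger board)

-- ===== LEMMAS AND PROOFS =====

-- the board shape Pre_ guarantees, preserved by every write
def pvGood (b : List (List String)) : Prop :=
  4 ≤ b.length ∧ ∀ i, i < 4 → 4 ≤ (b.getD i []).length

-- single-column model of A's per-cell step
def pvMPull (row : Nat) (ns : List Nat) (col : List String) : List String × Bool :=
  match ns with
  | [] => (col, false)
  | n :: rest =>
      if col.getD (row + n) "" ≠ "<>" then
        ((col.set row (col.getD (row + n) "")).set (row + n) "<>", true)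
      else pvMPull row rest col

def pvMStep (row : Nat) (col : List String) : List String × Bool :=
  if col.getD row "" = "<>" then pvMPull row (List.range' 1 (3 - row)) col else (col, false)

-- A's whole effect on one column / B's test on one column
def pvColFlagA (col : List String) : Bool :=
  let p0 := pvMStep 0 col
  let p1 := pvMStep 1 p0.1
  let p2 := pvMStep 2 p1.1
  p0.2 || p1.2 || p2.2

def pvColFlagB (col : List String) : Bool :=
  let vals := col.filter (fun v => v ≠ "<>")
  let newc := vals ++ List.replicate (4 - vals.length) "<>"
  if newc ≠ col then true else false

theorem pvGood_setc {b : List (List String)} (r c : Nat) (v : String) (h : pvGood b) :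
    pvGood (pvSetc b r c v) := by
  obtain ⟨h1, h2⟩ := h
  refine ⟨by simpa [pvSetc] using h1, ?_⟩
  intro i hi
  by_cases hir : r = i
  · subst hir
    have := h2 r hi
    simp only [pvSetc, List.getD, List.getElem?_modify] at *
    cases hb : b[r]?
    · simp [hb] at this
    · simp [hb] at this ⊢; omega
  · simpa [pvSetc, List.getD, List.getElem?_modify_ne _ _ hir] using h2 i hi

theorem pvGetc_setc_ne {b : List (List String)} {r c r' c' : Nat} (v : String)
    (h : r ≠ r' ∨ c ≠ c') : pvGetc (pvSetc b r c v) r' c' = pvGetc b r' c' := by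
  rcases h with h | h
  · simp [pvGetc, pvSetc, List.getD, List.getElem?_modify_ne _ _ h]
  · simp only [pvGetc, pvSetc, List.getD, List.getElem?_modify]
    by_cases hr : r = r'
    · subst hr; cases hb : b[r]? <;> simp [List.getElem?_set_ne h]
    · simp [hr]

theorem pvGetc_setc_self {b : List (List String)} {r c : Nat} (v : String)
    (hb : pvGood b) (hr : r < 4) (hc : c < 4) : pvGetc (pvSetc b r c v) r c = v := by
  obtain ⟨h1, h2⟩ := hb
  have hrl : r < b.length := by omega
  have hcl : c < (b.getD r []).length := by have := h2 r hr; omega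
  simp only [pvGetc, pvSetc, List.getD, List.getElem?_modify] at *
  cases hbr : b[r]? with
  | none => rw [List.getElem?_eq_getElem hrl] at hbr; simp at hbr
  | some row =>
    simp [hbr] at hcl ⊢
    simp [hcl]

theorem pvColOf_setc_ne {b : List (List String)} {r c c' : Nat} (v : String) (h : c ≠ c') :
    pvColOf (pvSetc b r c v) c' = pvColOf b c' := by
  simp only [pvColOf]
  exact List.map_congr_left (fun i _ => pvGetc_setc_ne v (Or.inr h))

theorem pvColOf_setc_self {b : List (List String)} {r c : Nat} (v : String)
    (hb : pvGood b) (_hr : r < 4) (hc : c < 4) :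
    pvColOf (pvSetc b r c v) c = (pvColOf b c).set r v := by
  apply List.ext_getElem (by simp [pvColOf])
  intro i h1 h2
  simp only [pvColOf, List.getElem_map, List.getElem_range] at h1 ⊢
  rw [List.getElem_set]
  by_cases hir : r = i
  · subst hir
    rw [if_pos rfl]
    exact pvGetc_setc_self v hb (by simpa using h1) hc
  · simp only [if_neg hir, List.getElem_map, List.getElem_range]
    exact pvGetc_setc_ne v (Or.inl hir)

theorem pvGetc_eq_colOf {b : List (List String)} {r : Nat} (c : Nat) (hr : r < 4) :
    pvGetc b r c = (pvColOf b c).getD r "" := by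
  simp only [pvColOf, List.range, List.range.loop]
  interval_cases r <;> simp [List.getD]

theorem pvPull_good {b : List (List String)} (row cell : Nat) (ns : List Nat) (h : pvGood b) :
    pvGood (pvPull row cell ns b).1 := by
  induction ns generalizing b with
  | nil => exact h
  | cons n rest ih =>
    simp only [pvPull]
    split
    · exact pvGood_setc _ _ _ (pvGood_setc _ _ _ h)
    · exact ih h

theorem pvPull_colOf_ne {b : List (List String)} (row : Nat) {cell c' : Nat} (ns : List Nat)
    (h : cell ≠ c') : pvColOf (pvPull row cell ns b).1 c' = pvColOf b c' := by
  induction ns generalizing b with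
  | nil => rfl
  | cons n rest ih =>
    simp only [pvPull]
    split
    · rw [pvColOf_setc_ne _ h, pvColOf_setc_ne _ h]
    · exact ih

theorem pvPull_sim {b : List (List String)} {row cell : Nat} {ns : List Nat}
    (hb : pvGood b) (hrow : row < 4) (hc : cell < 4) (hns : ∀ n ∈ ns, row + n < 4) :
    pvColOf (pvPull row cell ns b).1 cell = (pvMPull row ns (pvColOf b cell)).1 ∧
    (pvPull row cell ns b).2 = (pvMPull row ns (pvColOf b cell)).2 := by
  induction ns generalizing b with
  | nil => exact ⟨rfl, rfl⟩
  | cons n rest ih =>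
    have hn : row + n < 4 := hns n (by simp)
    have hcond : pvGetc b (row + n) cell = (pvColOf b cell).getD (row + n) "" :=
      pvGetc_eq_colOf cell hn
    simp only [pvPull, pvMPull, ← hcond]
    split
    · constructor
      · rw [pvColOf_setc_self _ (pvGood_setc _ _ _ hb) hn hc,
          pvColOf_setc_self _ hb hrow hc, hcond]
      · rfl
    · exact ih hb (fun m hm => hns m (by simp [hm]))

theorem pvStepA_good {s : List (List String) × Bool} (row cell : Nat) (h : pvGood s.1) :
    pvGood (pvStepA row cell s).1 := by
  simp only [pvStepA]
  split
  · exact pvPull_good _ _ _ h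
  · exact h

theorem pvStepA_colOf_ne {s : List (List String) × Bool} (row : Nat) {cell c' : Nat}
    (h : cell ≠ c') : pvColOf (pvStepA row cell s).1 c' = pvColOf s.1 c' := by
  simp only [pvStepA]
  split
  · exact pvPull_colOf_ne row _ h
  · rfl

theorem pvStepA_sim {s : List (List String) × Bool} {row cell : Nat}
    (hb : pvGood s.1) (hrow : row < 3) (hc : cell < 4) :
    pvColOf (pvStepA row cell s).1 cell = (pvMStep row (pvColOf s.1 cell)).1 ∧
    (pvStepA row cell s).2 = (s.2 || (pvMStep row (pvColOf s.1 cell)).2) := by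
  have hcond : pvGetc s.1 row cell = (pvColOf s.1 cell).getD row "" :=
    pvGetc_eq_colOf cell (by omega)
  have hns : ∀ n ∈ List.range' 1 (3 - row), row + n < 4 := by
    intro n hn; rw [List.mem_range'] at hn; omega
  simp only [pvStepA, pvMStep, ← hcond]
  split
  · obtain ⟨h1, h2⟩ := pvPull_sim hb (by omega) hc hns
    exact ⟨h1, by rw [h2]⟩
  · simp

theorem pvRow_sim {s : List (List String) × Bool} {row : Nat}
    (hb : pvGood s.1) (hrow : row < 3) :
    pvGood ((List.range 4).foldl (fun s cell => pvStepA row cell s) s).1 ∧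
    (∀ c, c < 4 →
      pvColOf ((List.range 4).foldl (fun s cell => pvStepA row cell s) s).1 c =
        (pvMStep row (pvColOf s.1 c)).1) ∧
    ((List.range 4).foldl (fun s cell => pvStepA row cell s) s).2 =
      (s.2 || (pvMStep row (pvColOf s.1 0)).2 || (pvMStep row (pvColOf s.1 1)).2 ||
        (pvMStep row (pvColOf s.1 2)).2 || (pvMStep row (pvColOf s.1 3)).2) := by
  have hr4 : (List.range 4) = [0, 1, 2, 3] := rfl
  simp only [hr4, List.foldl]
  set s0 := pvStepA row 0 s with hs0
  set s1 := pvStepA row 1 s0 with hs1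
  set s2 := pvStepA row 2 s1 with hs2
  set s3 := pvStepA row 3 s2 with hs3
  have g0 : pvGood s0.1 := pvStepA_good row 0 hb
  have g1 : pvGood s1.1 := pvStepA_good row 1 g0
  have g2 : pvGood s2.1 := pvStepA_good row 2 g1
  have g3 : pvGood s3.1 := pvStepA_good row 3 g2
  have m0 := pvStepA_sim (s := s) (cell := 0) hb hrow (by omega)
  have m1 := pvStepA_sim (s := s0) (cell := 1) g0 hrow (by omega)
  have m2 := pvStepA_sim (s := s1) (cell := 2) g1 hrow (by omega)
  have m3 := pvStepA_sim (s := s2) (cell := 3) g2 hrow (by omega)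
  -- untouched columns
  have n01 : pvColOf s0.1 1 = pvColOf s.1 1 := pvStepA_colOf_ne row (by omega)
  have n02 : pvColOf s0.1 2 = pvColOf s.1 2 := pvStepA_colOf_ne row (by omega)
  have n03 : pvColOf s0.1 3 = pvColOf s.1 3 := pvStepA_colOf_ne row (by omega)
  have n10 : pvColOf s1.1 0 = pvColOf s0.1 0 := pvStepA_colOf_ne row (by omega)
  have n12 : pvColOf s1.1 2 = pvColOf s0.1 2 := pvStepA_colOf_ne row (by omega)
  have n13 : pvColOf s1.1 3 = pvColOf s0.1 3 := pvStepA_colOf_ne row (by omega)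
  have n20 : pvColOf s2.1 0 = pvColOf s1.1 0 := pvStepA_colOf_ne row (by omega)
  have n21 : pvColOf s2.1 1 = pvColOf s1.1 1 := pvStepA_colOf_ne row (by omega)
  have n23 : pvColOf s2.1 3 = pvColOf s1.1 3 := pvStepA_colOf_ne row (by omega)
  have n30 : pvColOf s3.1 0 = pvColOf s2.1 0 := pvStepA_colOf_ne row (by omega)
  have n31 : pvColOf s3.1 1 = pvColOf s2.1 1 := pvStepA_colOf_ne row (by omega)
  have n32 : pvColOf s3.1 2 = pvColOf s2.1 2 := pvStepA_colOf_ne row (by omega)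
  refine ⟨g3, ?_, ?_⟩
  · intro c hc
    interval_cases c
    · rw [n30, n20, n10, m0.1]
    · rw [n31, n21, m1.1, n01]
    · rw [n32, m2.1, n12, n02]
    · rw [m3.1, n23, n13, n03]
  · rw [m3.2, m2.2, m1.2, m0.2, n01, n12, n02, n23, n13, n03]

theorem pvA_columns {b : List (List String)} (hb : pvGood b) :
    up_rearranger b =
      (pvColFlagA (pvColOf b 0) || pvColFlagA (pvColOf b 1) ||
        pvColFlagA (pvColOf b 2) || pvColFlagA (pvColOf b 3)) := by
  have hr3 : (List.range 3) = [0, 1, 2] := rfl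
  unfold up_rearranger
  simp only [hr3, List.foldl]
  set t1 := (List.range 4).foldl (fun s cell => pvStepA 0 cell s) (b, false) with ht1
  set t2 := (List.range 4).foldl (fun s cell => pvStepA 1 cell s) t1 with ht2
  set t3 := (List.range 4).foldl (fun s cell => pvStepA 2 cell s) t2 with ht3
  obtain ⟨g1, c1, f1⟩ := pvRow_sim (s := (b, false)) (row := 0) hb (by omega)
  obtain ⟨g2, c2, f2⟩ := pvRow_sim (s := t1) (row := 1) g1 (by omega)
  obtain ⟨g3, c3, f3⟩ := pvRow_sim (s := t2) (row := 2) g2 (by omega)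
  rw [f3, f2, f1]
  rw [c2 0 (by omega), c2 1 (by omega), c2 2 (by omega), c2 3 (by omega),
    c1 0 (by omega), c1 1 (by omega), c1 2 (by omega), c1 3 (by omega)]
  simp only [pvColFlagA, Bool.false_or]
  generalize (pvMStep 2 (pvMStep 1 (pvMStep 0 (pvColOf b 0)).1).1).2 = C0
  generalize (pvMStep 2 (pvMStep 1 (pvMStep 0 (pvColOf b 1)).1).1).2 = C1
  generalize (pvMStep 2 (pvMStep 1 (pvMStep 0 (pvColOf b 2)).1).1).2 = C2
  generalize (pvMStep 2 (pvMStep 1 (pvMStep 0 (pvColOf b 3)).1).1).2 = C3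
  generalize (pvMStep 1 (pvMStep 0 (pvColOf b 0)).1).2 = B0
  generalize (pvMStep 1 (pvMStep 0 (pvColOf b 1)).1).2 = B1
  generalize (pvMStep 1 (pvMStep 0 (pvColOf b 2)).1).2 = B2
  generalize (pvMStep 1 (pvMStep 0 (pvColOf b 3)).1).2 = B3
  generalize (pvMStep 0 (pvColOf b 0)).2 = A0
  generalize (pvMStep 0 (pvColOf b 1)).2 = A1
  generalize (pvMStep 0 (pvColOf b 2)).2 = A2
  generalize (pvMStep 0 (pvColOf b 3)).2 = A3
  revert A0 A1 A2 A3 B0 B1 B2 B3 C0 C1 C2 C3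
  decide

theorem pvB_columns (b : List (List String)) :
    up_rearranger_alt b =
      (pvColFlagB (pvColOf b 0) || pvColFlagB (pvColOf b 1) ||
        pvColFlagB (pvColOf b 2) || pvColFlagB (pvColOf b 3)) := by
  have hr4 : (List.range 4) = [0, 1, 2, 3] := rfl
  unfold up_rearranger_alt
  simp only [hr4, List.map, List.foldl, pvColFlagB]
  split_ifs <;> simp_all

theorem pvColOf_four (b : List (List String)) (c : Nat) :
    pvColOf b c = [pvGetc b 0 c, pvGetc b 1 c, pvGetc b 2 c, pvGetc b 3 c] := rfl

theorem pvCol_eq (w x y z : String) : pvColFlagA [w, x, y, z] = pvColFlagB [w, x, y, z] := by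
  by_cases hw : w = "<>" <;> by_cases hx : x = "<>" <;> by_cases hy : y = "<>" <;>
    by_cases hz : z = "<>" <;>
    simp_all [pvColFlagA, pvColFlagB, pvMStep, pvMPull, List.range', List.getD, List.set]

-- ===== VERDICT (by name: the statement is the Claim_ definition above) =====
theorem up_rearranger_spec : Claim_equal_up_rearranger := by
  intro board _ hpre
  unfold Spec_up_rearranger
  have hb : pvGood board := hpre
  rw [pvA_columns hb, pvB_columns]
  rw [pvColOf_four board 0, pvColOf_four board 1, pvColOf_four board 2, pvColOf_four board 3]
  rw [pvCol_eq, pvCol_eq, pvCol_eq, pvCol_eq]
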